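-- pv_equiv track=rewrite | github.com/jackcallard/advent2024 | day5/solution.py | valid_update
-- ===== SOURCE A (Python) =====
-- def get_relevant_deps(page_num, dependencies, nums_to_care_about):
--     page_deps = dependencies.get(page_num, set())
--     return set(filter(lambda x: x in nums_to_care_about, page_deps))
--
-- def valid_update(update, dependencies):
--     seen_nums = set()
--     reversed_update = reversed(update)
--     for page_num in reversed_update:
--         conflicting_deps = get_relevant_deps(page_num, dependencies, seen_nums)
--         if (len(conflicting_deps)):
--             return False
--         seen_nums.add(page_num)
--
--     return True
-- ===== SOURCE B (Python) =====
-- def valid_update(update, dependencies):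
--     last_index = {page: i for i, page in enumerate(update)}
--     for p, page in enumerate(update):
--         for dep in dependencies.get(page, ()):
--             if last_index.get(dep, -1) > p:
--                 return False
--     return True
-- ===== Notes on version B (the rewrite author's own statement) =====
-- stated objective: alternative
-- what changed: B replaces A's reverse scan with an accumulated seen-set by a single forward scan over a last-occurrence position table built once from enumerate, comparing recorded indices instead of maintaining and filtering a growing set.
import Mathlib
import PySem

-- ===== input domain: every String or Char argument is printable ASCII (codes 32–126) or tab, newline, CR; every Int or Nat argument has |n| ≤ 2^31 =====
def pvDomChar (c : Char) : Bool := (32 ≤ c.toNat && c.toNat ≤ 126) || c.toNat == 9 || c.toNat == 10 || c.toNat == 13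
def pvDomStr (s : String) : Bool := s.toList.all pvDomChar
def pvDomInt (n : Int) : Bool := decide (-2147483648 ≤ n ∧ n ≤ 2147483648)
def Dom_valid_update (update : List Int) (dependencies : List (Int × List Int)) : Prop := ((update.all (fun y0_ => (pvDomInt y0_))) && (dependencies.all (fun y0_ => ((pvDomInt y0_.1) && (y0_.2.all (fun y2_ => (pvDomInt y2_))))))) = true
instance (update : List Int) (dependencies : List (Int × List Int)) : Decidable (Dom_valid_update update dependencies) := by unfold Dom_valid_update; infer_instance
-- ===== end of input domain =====

-- B replaces A's reverse scan with a seen-set by a forward scan over a last-occurrence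
-- index table; same asymptotic cost, different decomposition (objective: alternative).

-- ===== PORT A =====
def get_relevant_deps (page_num : Int) (dependencies : List (Int × List Int)) (nums_to_care_about : PySem.Set Int) : PySem.Set Int :=
  let page_deps := PySem.Dict.getD ⟨dependencies⟩ page_num []
  PySem.Set.ofList (page_deps.filter (fun x => PySem.Set.contains nums_to_care_about x))

def valid_update_loop (dependencies : List (Int × List Int)) : List Int → PySem.Set Int → Bool
  | [], _ => true
  | page_num :: rest, seen_nums =>
    let conflicting_deps := get_relevant_deps page_num dependencies seen_nums
    if PySem.Set.len conflicting_deps ≠ 0 then false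
    else valid_update_loop dependencies rest (PySem.Set.add seen_nums page_num)

def valid_update (update : List Int) (dependencies : List (Int × List Int)) : Bool :=
  valid_update_loop dependencies update.reverse PySem.Set.empty

-- ===== PORT B =====
def valid_update_alt (update : List Int) (dependencies : List (Int × List Int)) : Bool :=
  let last_index : PySem.Dict Int Int :=
    (PySem.List.enumerate update).foldl (fun d ip => PySem.Dict.insert d ip.2 ip.1) PySem.Dict.empty
  !((PySem.List.enumerate update).any (fun pp =>
      (PySem.Dict.getD ⟨dependencies⟩ pp.2 []).any (fun dep =>
        PySem.Dict.getD last_index dep (-1) > pp.1)))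

-- ===== PRECONDITION & SPEC =====
def Spec_valid_update (update : List Int) (dependencies : List (Int × List Int)) (out : Bool) : Prop := out = valid_update_alt update dependencies
instance (update : List Int) (dependencies : List (Int × List Int)) (out : Bool) : Decidable (Spec_valid_update update dependencies out) := by unfold Spec_valid_update; infer_instance

-- ===== CLAIM (what is proved, stated in full; the proofs are below) =====
def Claim_equal_valid_update : Prop := ∀ (update : List Int) (dependencies : List (Int × List Int)), Dom_valid_update update dependencies → Spec_valid_update update dependencies (valid_update update dependencies)

-- ===== LEMMAS AND PROOFS =====

-- the common characterisation: no page has a dependency occurring strictly to its right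
def OkAt (dependencies : List (Int × List Int)) (update : List Int) : Prop :=
  ∀ (p : Nat) (h : p < update.length),
    ∀ dep ∈ PySem.Dict.getD ⟨dependencies⟩ update[p] [], dep ∉ update.drop (p + 1)

-- A's conflict test fires iff some dependency of the page is in the seen set
lemma conflict_iff (page : Int) (d : List (Int × List Int)) (seen : PySem.Set Int) :
    PySem.Set.len (get_relevant_deps page d seen) ≠ 0 ↔
      ∃ x ∈ PySem.Dict.getD ⟨d⟩ page [], x ∈ seen := by
  have key : ∀ (m : List Int), PySem.Set.len (PySem.Set.ofList m) ≠ 0 ↔ ∃ x, x ∈ m := by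
    intro m
    constructor
    · intro h
      have hne : PySem.Set.ofList m ≠ [] := by
        intro he
        apply h
        simp [PySem.Set.len, he]
      rcases List.exists_mem_of_ne_nil _ hne with ⟨x, hx⟩
      exact ⟨x, (PySem.Set.mem_ofList m x).1 hx⟩
    · rintro ⟨x, hx⟩ h
      have hm : x ∈ PySem.Set.ofList m := (PySem.Set.mem_ofList m x).2 hx
      simp only [PySem.Set.len, Int.natCast_eq_zero, List.length_eq_zero_iff] at h
      simp [h] at hm
  unfold get_relevant_deps
  rw [key]
  constructor
  · rintro ⟨x, hx⟩
    rw [List.mem_filter] at hx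
    exact ⟨x, hx.1, (PySem.Set.contains_iff seen x).1 hx.2⟩
  · rintro ⟨x, hx, hs⟩
    exact ⟨x, List.mem_filter.2 ⟨hx, (PySem.Set.contains_iff seen x).2 hs⟩⟩

-- invariant of A's reverse loop
lemma loop_char (d : List (Int × List Int)) (l : List Int) (seen : PySem.Set Int) :
    valid_update_loop d l seen = true ↔
      ∀ (k : Nat) (h : k < l.length),
        ∀ dep ∈ PySem.Dict.getD ⟨d⟩ l[k] [], dep ∉ seen ∧ dep ∉ l.take k := by
  induction l generalizing seen with
  | nil => simp [valid_update_loop]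
  | cons page rest ih =>
    rw [valid_update_loop]
    show (if PySem.Set.len (get_relevant_deps page d seen) ≠ 0 then false
          else valid_update_loop d rest (PySem.Set.add seen page)) = true ↔ _
    by_cases hc : PySem.Set.len (get_relevant_deps page d seen) ≠ 0
    · rw [if_pos hc]
      simp only [Bool.false_eq_true, false_iff]
      rw [conflict_iff] at hc
      obtain ⟨x, hx, hxs⟩ := hc
      intro hall
      exact (hall 0 (by simp) x (by simpa using hx)).1 hxs
    · rw [if_neg hc, ih]
      rw [conflict_iff] at hc
      push Not at hc
      constructor
      · intro h k hk dep hdep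
        cases k with
        | zero => exact ⟨fun hs => hc dep (by simpa using hdep) hs, by simp⟩
        | succ k =>
          have hk' : k < rest.length := by simpa using hk
          obtain ⟨h21, h22⟩ := h k hk' dep (by simpa using hdep)
          rw [PySem.Set.mem_add] at h21
          push Not at h21
          refine ⟨h21.1, ?_⟩
          simp only [List.take_succ_cons, List.mem_cons]
          rintro (rfl | hmem)
          · exact h21.2 rfl
          · exact h22 hmem
      · intro h k hk dep hdep
        obtain ⟨h21, h22⟩ := h (k+1) (by simpa using Nat.succ_lt_succ hk) dep (by simpa using hdep)
        simp only [List.take_succ_cons, List.mem_cons] at h22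
        push Not at h22
        refine ⟨?_, h22.2⟩
        rw [PySem.Set.mem_add]
        rintro (hs | rfl)
        · exact h21 hs
        · exact h22.1 rfl

lemma a_char (u : List Int) (d : List (Int × List Int)) :
    valid_update u d = true ↔ OkAt d u := by
  rw [valid_update, loop_char]
  unfold OkAt
  constructor
  · intro h p hp dep hdep hdrop
    have hk : u.length - 1 - p < u.reverse.length := by
      simp only [List.length_reverse]
      omega
    have hidx : u.reverse[u.length - 1 - p]'hk = u[p] := by
      rw [List.getElem_reverse]
      congr 1
      omega
    have h2 := h (u.length - 1 - p) hk dep (by rw [hidx]; exact hdep)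
    apply h2.2
    have ht : u.reverse.take (u.length - 1 - p) = (u.drop (p + 1)).reverse := by
      rw [List.reverse_drop]
      congr 1
      omega
    rw [ht, List.mem_reverse]
    exact hdrop
  · intro h k hk dep hdep
    refine ⟨by simp [PySem.Set.empty], ?_⟩
    have hlen : k < u.length := by simpa using hk
    have hplt : u.length - 1 - k < u.length := by omega
    have hidx : u.reverse[k]'hk = u[u.length - 1 - k] := by
      rw [List.getElem_reverse]
    intro hmem
    apply h (u.length - 1 - k) hplt dep (by rw [← hidx]; exact hdep)
    have ht : u.reverse.take k = (u.drop (u.length - 1 - k + 1)).reverse := by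
      rw [List.reverse_drop]
      congr 1
      omega
    rw [ht, List.mem_reverse] at hmem
    exact hmem

-- B's last-index table: getD li x (-1) > p iff x occurs strictly after position p
lemma last_index_char (u : List Int) (x : Int) (p : Nat) :
    PySem.Dict.getD
      ((PySem.List.enumerate u).foldl (fun d ip => PySem.Dict.insert d ip.2 ip.1) PySem.Dict.empty)
      x (-1) > (p : Int) ↔ x ∈ u.drop (p + 1) := by
  induction u using List.reverseRecOn with
  | nil =>
    simp [PySem.List.enumerate, PySem.Dict.getD, PySem.Dict.get?, PySem.Dict.empty]
  | append_singleton xs y ih =>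
    rw [PySem.List.enumerate_append, List.foldl_append]
    have he : PySem.List.enumerate [y] (0 + (xs.length : Int)) = [((xs.length : Int), y)] := by
      simp [PySem.List.enumerate_cons, PySem.List.enumerate_nil]
    rw [he]
    simp only [List.foldl_cons, List.foldl_nil]
    rw [List.drop_append]
    by_cases hxy : x = y
    · subst hxy
      rw [PySem.Dict.getD_insert_self]
      constructor
      · intro hgt
        have hple : p < xs.length := by exact_mod_cast hgt
        have h0 : p + 1 - xs.length = 0 := by omega
        rw [List.mem_append, h0]
        exact Or.inr (by simp)
      · intro hmem
        rw [List.mem_append] at hmem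
        rcases hmem with hmem | hmem
        · have := List.length_pos_of_mem hmem
          simp only [List.length_drop] at this
          exact_mod_cast show (p : Int) < xs.length by omega
        · have := List.length_pos_of_mem hmem
          simp only [List.length_drop, List.length_cons, List.length_nil] at this
          exact_mod_cast show (p : Int) < xs.length by omega
    · rw [PySem.Dict.getD_insert_of_ne _ _ _ hxy, ih]
      rw [List.mem_append]
      constructor
      · exact Or.inl
      · rintro (hmem | hmem)
        · exact hmem
        · exact absurd (List.eq_of_mem_singleton (List.mem_of_mem_drop hmem)) hxy

lemma b_char (u : List Int) (d : List (Int × List Int)) :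
    valid_update_alt u d = true ↔ OkAt d u := by
  unfold valid_update_alt OkAt
  rw [Bool.not_eq_true']
  simp only [List.any_eq_false, List.any_eq_true, decide_eq_true_eq, not_exists, not_and, not_lt]
  constructor
  · intro h p hp dep hdep hdrop
    have hm : ((p : Int), u[p]) ∈ PySem.List.enumerate u := by
      rw [PySem.List.mem_enumerate_iff]
      exact ⟨p, hp, by simp⟩
    have h2 := h _ hm dep hdep
    have h3 := (last_index_char u dep p).2 hdrop
    omega
  · intro h pp hpp dep hdep
    rw [PySem.List.mem_enumerate_iff] at hpp
    obtain ⟨k, hk, rfl⟩ := hpp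
    simp only [zero_add] at hdep ⊢
    by_contra hlt
    push Not at hlt
    exact h k hk dep hdep ((last_index_char u dep k).1 hlt)

-- ===== VERDICT (by name: the statement is the Claim_ definition above) =====
theorem valid_update_spec : Claim_equal_valid_update := by
  intro u d _
  unfold Spec_valid_update
  exact Bool.eq_iff_iff.mpr ((a_char u d).trans (b_char u d).symm)
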